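-- pv_equiv track=rewrite | github.com/LeanVibe/bee-hive | config/security/mobile-compliance.py | _calculate_overall_status
-- ===== SOURCE A (Python) =====
-- from typing import Dict, List, Optional, Any, Tuple
--
-- def _calculate_overall_status(results: List[Any]) -> str:
--     """Calculate overall security status"""
--     statuses = []
--     for result in results:
--         if isinstance(result, dict) and 'status' in result:
--             statuses.append(result['status'])
--
--     if not statuses:
--         return 'unknown'
--
--     if all(s == 'pass' for s in statuses):
--         return 'secure'
--     elif any(s == 'fail' for s in statuses):
--         return 'vulnerable'
--     else:
--         return 'warning'
-- ===== SOURCE B (Python) =====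
-- def _calculate_overall_status(results):
--     """Calculate overall security status by severity-lattice reduction:
--     map each valid status to a severity (pass=0, other=1, fail=2, none-seen=-1),
--     keep the running max, and index a label table by max+1."""
--     sev = -1
--     for result in results:
--         if isinstance(result, dict) and 'status' in result:
--             s = result['status']
--             sev = max(sev, 0 if s == 'pass' else 2 if s == 'fail' else 1)
--     return ('unknown', 'secure', 'warning', 'vulnerable')[sev + 1]
-- ===== Notes on version B (the rewrite author's own statement) =====
-- stated objective: alternative
-- what changed: Replaces A's collect-statuses-then-all()/any() branch cascade by a severity-lattice reduction: each valid status is mapped to a numeric severity (pass=0, other=1, fail=2), the running max is kept (starting at -1 for none seen), and the result is a table lookup by max+1 -- correct because A's branch order is exactly highest-severity-wins.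
import Mathlib
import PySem

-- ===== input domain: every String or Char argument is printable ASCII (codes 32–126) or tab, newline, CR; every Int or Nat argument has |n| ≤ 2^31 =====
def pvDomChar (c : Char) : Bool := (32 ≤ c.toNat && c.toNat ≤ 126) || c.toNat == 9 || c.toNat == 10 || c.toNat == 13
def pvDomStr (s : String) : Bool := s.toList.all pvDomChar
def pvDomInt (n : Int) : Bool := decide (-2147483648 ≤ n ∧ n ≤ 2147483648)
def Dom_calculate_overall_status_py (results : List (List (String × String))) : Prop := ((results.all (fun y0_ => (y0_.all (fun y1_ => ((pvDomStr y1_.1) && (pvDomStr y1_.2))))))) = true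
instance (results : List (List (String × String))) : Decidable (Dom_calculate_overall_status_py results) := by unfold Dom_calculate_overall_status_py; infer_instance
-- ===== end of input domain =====

-- B replaces A's statuses list + all()/any() branch cascade by a severity-lattice reduction (running max of pass=0/other=1/fail=2, -1 for none) with a table lookup; alternative decomposition, same cost.


-- shared helper: Python "'status' in result" / "result['status']" — first match in the assoc list
def pvStatus? : List (String × String) → Option String
  | [] => none
  | (k, v) :: rest => if k == "status" then some v else pvStatus? rest

-- ===== PORT A =====
def calculate_overall_status_py (results : List (List (String × String))) : String :=
  let statuses := results.foldl (fun acc r =>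
    match pvStatus? r with
    | some v => acc ++ [v]
    | none => acc) []
  if statuses.isEmpty then "unknown"
  else if statuses.all (fun s => s == "pass") then "secure"
  else if statuses.any (fun s => s == "fail") then "vulnerable"
  else "warning"

-- ===== PORT B =====
-- severity of one status string: pass=0, fail=2, anything else=1
def pvSev (s : String) : Int := if s == "pass" then 0 else if s == "fail" then 2 else 1

def calculate_overall_status_py_alt (results : List (List (String × String))) : String :=
  let sev := results.foldl (fun (sev : Int) r =>
    match pvStatus? r with
    | some s => max sev (pvSev s)
    | none => sev) (-1)
  -- tuple indexing LABELS[sev+1]; sev+1 is always in range (0..3), so the getD default is never used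
  (PySem.List.pyGet? ["unknown", "secure", "warning", "vulnerable"] (sev + 1)).getD ""

-- ===== PRECONDITION & SPEC =====
def Spec_calculate_overall_status_py (results : List (List (String × String))) (out : String) : Prop := out = calculate_overall_status_py_alt results
instance (results : List (List (String × String))) (out : String) : Decidable (Spec_calculate_overall_status_py results out) := by unfold Spec_calculate_overall_status_py; infer_instance

-- ===== CLAIM (what is proved, stated in full; the proofs are below) =====
def Claim_equal_calculate_overall_status_py : Prop := ∀ (results : List (List (String × String))), Dom_calculate_overall_status_py results → Spec_calculate_overall_status_py results (calculate_overall_status_py results)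

-- ===== LEMMAS AND PROOFS =====

-- A's loop collects exactly the filterMap of pvStatus?
theorem pvFoldA (results : List (List (String × String))) (acc : List String) :
    results.foldl (fun acc r =>
      match pvStatus? r with
      | some v => acc ++ [v]
      | none => acc) acc = acc ++ results.filterMap pvStatus? := by
  induction results generalizing acc with
  | nil => simp
  | cons r rest ih =>
    cases h : pvStatus? r <;> simp [List.foldl, h, ih]

-- B's loop is the max-reduction over that same filterMap
theorem pvFoldB (results : List (List (String × String))) (a : Int) :
    results.foldl (fun (sev : Int) r =>
      match pvStatus? r with
      | some s => max sev (pvSev s)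
      | none => sev) a =
    (results.filterMap pvStatus?).foldl (fun sev s => max sev (pvSev s)) a := by
  induction results generalizing a with
  | nil => rfl
  | cons r rest ih =>
    rw [List.foldl_cons, List.filterMap_cons]
    cases h : pvStatus? r <;> simp [ih]

-- pvSev is nonnegative
theorem pvSev_nonneg (s : String) : 0 ≤ pvSev s := by
  unfold pvSev; split_ifs <;> omega

-- pulling the accumulator out of the max-reduction
theorem pvFoldMax (t : List String) (a : Int) (ha : -1 ≤ a) :
    t.foldl (fun sev s => max sev (pvSev s)) a =
    max a (t.foldl (fun sev s => max sev (pvSev s)) (-1)) := by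
  induction t generalizing a with
  | nil => simpa using ha
  | cons u v ih =>
    rw [List.foldl_cons, List.foldl_cons,
        ih (max a (pvSev u)) (le_trans ha (le_max_left _ _)),
        ih (max (-1) (pvSev u)) (le_max_left _ _)]
    have := pvSev_nonneg u
    omega

-- the max-reduction of a status list, characterised by A's branch conditions
theorem pvMaxChar (l : List String) :
    l.foldl (fun sev s => max sev (pvSev s)) (-1) =
    (if l.isEmpty then -1
     else if l.all (fun s => s == "pass") then 0
     else if l.any (fun s => s == "fail") then 2
     else 1) := by
  induction l with
  | nil => rfl
  | cons s t ih =>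
    rw [List.foldl_cons, pvFoldMax t _ (le_max_left _ _), ih]
    have hs := pvSev_nonneg s
    rw [show max (-1 : Int) (pvSev s) = pvSev s by omega]
    simp only [List.isEmpty_cons, List.all_cons, List.any_cons, Bool.false_eq_true, if_false]
    by_cases he : t.isEmpty
    · rw [List.isEmpty_iff] at he
      subst he
      unfold pvSev
      split_ifs with h1 h2 <;> simp_all
    · simp only [he, Bool.false_eq_true, if_false]
      rcases Bool.dichotomy (t.all fun s => s == "pass") with hA | hA <;>
        rcases Bool.dichotomy (t.any fun s => s == "fail") with hF | hF <;>
          simp only [hA, hF, Bool.false_eq_true, if_false, if_true, Bool.and_false,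
            Bool.and_true, Bool.or_false, Bool.or_true]
      · unfold pvSev; split_ifs <;> simp_all
      · unfold pvSev; split_ifs <;> simp_all
      · unfold pvSev; split_ifs <;> simp_all
      · -- impossible: every status is "pass" yet one is "fail"
        exfalso
        simp only [List.all_eq_true, List.any_eq_true, beq_iff_eq] at hA hF
        obtain ⟨x, hx, hxf⟩ := hF
        have := hA x hx
        simp [this] at hxf

-- ===== VERDICT (by name: the statement is the Claim_ definition above) =====
theorem calculate_overall_status_py_spec : Claim_equal_calculate_overall_status_py := by
  intro results _
  unfold Spec_calculate_overall_status_py calculate_overall_status_py calculate_overall_status_py_alt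
  simp only [pvFoldA, pvFoldB, pvMaxChar, List.nil_append]
  split_ifs <;> rfl
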